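-- pv_equiv track=rewrite | github.com/sasen-git/vhh-designer | active/utilities/charge_balance_vhh_windows.py | group_into_runs
-- ===== SOURCE A (Python) =====
-- from typing import Dict, List, Tuple, Optional
--
-- def group_into_runs(sorted_positions: List[int]) -> List[List[int]]:
--     """Group positions into consecutive runs: e.g., [42],[49,50],[66..104],[118..128]."""
--     if not sorted_positions:
--         return []
--     runs = [[sorted_positions[0]]]
--     for x in sorted_positions[1:]:
--         if x == runs[-1][-1] + 1:
--             runs[-1].append(x)
--         else:
--             runs.append([x])
--     return runs
-- ===== SOURCE B (Python) =====
-- from itertools import groupby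
-- from typing import List
--
-- def group_into_runs(sorted_positions: List[int]) -> List[List[int]]:
--     """Group positions into consecutive runs via groupby on value-minus-index."""
--     return [[x for _, x in grp]
--             for _, grp in groupby(enumerate(sorted_positions),
--                                   key=lambda p: p[1] - p[0])]
-- ===== Notes on version B (the rewrite author's own statement) =====
-- stated objective: idiomatic
-- what changed: Replaces the adjacent-compare-and-append loop with itertools.groupby over enumerate keyed on value-minus-index, which is constant exactly along a consecutive run.
import Mathlib
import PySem

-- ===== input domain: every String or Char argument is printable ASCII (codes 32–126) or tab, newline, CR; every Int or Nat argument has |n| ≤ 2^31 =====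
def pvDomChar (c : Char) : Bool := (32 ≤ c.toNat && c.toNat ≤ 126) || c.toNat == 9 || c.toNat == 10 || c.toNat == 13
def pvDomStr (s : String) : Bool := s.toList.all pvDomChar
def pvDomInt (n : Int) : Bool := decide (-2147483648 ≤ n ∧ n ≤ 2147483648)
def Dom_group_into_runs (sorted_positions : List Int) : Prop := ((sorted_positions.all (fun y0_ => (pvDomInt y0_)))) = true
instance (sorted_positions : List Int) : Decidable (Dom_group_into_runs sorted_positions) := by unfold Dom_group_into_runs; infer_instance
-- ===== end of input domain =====

-- B replaces A's adjacent-compare-and-append loop with a groupby-on-(value − index) decomposition (objective: idiomatic; same cost).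

-- ===== PORT A =====
-- runs[-1].append(x): rebuild the list with x appended to its last element
def pyAppendLast (runs : List (List Int)) (x : Int) : List (List Int) :=
  match runs with
  | [] => []
  | [r] => [r ++ [x]]
  | r :: rs => r :: pyAppendLast rs x

-- A's condition 'x == runs[-1][-1] + 1' is written 'last = some (x - 1)' (same test on Int)
def group_into_runs (sorted_positions : List Int) : List (List Int) :=
  match sorted_positions with
  | [] => []
  | x :: rest =>
    rest.foldl (fun runs y =>
      if (runs.getLastD []).getLast? = some (y - 1) then pyAppendLast runs y
      else runs ++ [[y]]) [[x]]

-- ===== PORT B =====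
-- itertools.groupby: take the maximal prefix whose key (value − index) equals k
def takeGroup (k : Int) : List (Int × Int) → List Int × List (Int × Int)
  | [] => ([], [])
  | (i, x) :: rest =>
    if x - i = k then
      let p := takeGroup k rest
      (x :: p.1, p.2)
    else ([], (i, x) :: rest)

theorem takeGroup_len (k : Int) (l : List (Int × Int)) : (takeGroup k l).2.length ≤ l.length := by
  induction l with
  | nil => simp [takeGroup]
  | cons h t ih =>
    obtain ⟨i, x⟩ := h
    simp only [takeGroup]
    split
    · simpa using Nat.le_succ_of_le ih
    · simp

def groupsBy : List (Int × Int) → List (List Int)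
  | [] => []
  | (i, x) :: rest =>
    (x :: (takeGroup (x - i) rest).1) :: groupsBy (takeGroup (x - i) rest).2
  termination_by l => l.length
  decreasing_by simpa using Nat.lt_succ_of_le (takeGroup_len (x - i) rest)

def group_into_runs_alt (sorted_positions : List Int) : List (List Int) :=
  groupsBy (PySem.List.enumerate sorted_positions 0)

-- ===== PRECONDITION & SPEC =====
def Spec_group_into_runs (sorted_positions : List Int) (out : List (List Int)) : Prop := out = group_into_runs_alt sorted_positions
instance (sorted_positions : List Int) (out : List (List Int)) : Decidable (Spec_group_into_runs sorted_positions out) := by unfold Spec_group_into_runs; infer_instance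

-- ===== CLAIM (what is proved, stated in full; the proofs are below) =====
def Claim_equal_group_into_runs : Prop := ∀ (sorted_positions : List Int), Dom_group_into_runs sorted_positions → Spec_group_into_runs sorted_positions (group_into_runs sorted_positions)

-- ===== LEMMAS AND PROOFS =====

-- canonical run decomposition both ports are reduced to
def takeRun (p : Int) : List Int → List Int × List Int
  | [] => ([], [])
  | y :: ys =>
    if y = p + 1 then ((takeRun y ys).1.cons y, (takeRun y ys).2)
    else ([], y :: ys)

theorem takeRun_len (p : Int) (l : List Int) : (takeRun p l).2.length ≤ l.length := by
  induction l generalizing p with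
  | nil => simp [takeRun]
  | cons y ys ih =>
    simp only [takeRun]
    split
    · simpa using Nat.le_succ_of_le (ih y)
    · simp

def chunk : List Int → List (List Int)
  | [] => []
  | x :: rest => (x :: (takeRun x rest).1) :: chunk (takeRun x rest).2
  termination_by l => l.length
  decreasing_by simpa using Nat.lt_succ_of_le (takeRun_len x rest)

-- B side: takeGroup over an enumeration with key p − i is takeRun from previous value p
theorem takeGroup_enum (ys : List Int) (p i : Int) :
    takeGroup (p - i) (PySem.List.enumerate ys (i + 1)) =
      ((takeRun p ys).1,
        PySem.List.enumerate (takeRun p ys).2 (i + 1 + ((takeRun p ys).1.length : Int))) := by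
  induction ys generalizing p i with
  | nil => simp [takeRun, takeGroup, PySem.List.enumerate_nil]
  | cons y ys ih =>
    rw [PySem.List.enumerate_cons]
    by_cases hy : y = p + 1
    · subst hy
      have hk : p + 1 - (i + 1) = p - i := by ring
      have ih' := ih (p + 1) (i + 1)
      rw [hk] at ih'
      simp only [takeGroup, takeRun]
      rw [if_pos hk]
      simp only [if_true]
      rw [ih']
      simp only [List.length_cons, Prod.mk.injEq]
      refine ⟨trivial, ?_⟩
      congr 1
      push_cast
      ring
    · have hk : ¬ (y - (i + 1) = p - i) := by omega
      simp [takeGroup, takeRun, hy, hk, PySem.List.enumerate_cons]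

theorem groupsBy_enum (n : Nat) : ∀ (ys : List Int), ys.length ≤ n → ∀ (i : Int),
    groupsBy (PySem.List.enumerate ys i) = chunk ys := by
  induction n with
  | zero =>
    intro ys h i
    have : ys = [] := List.eq_nil_of_length_eq_zero (Nat.le_zero.mp h)
    simp [this, chunk, groupsBy, PySem.List.enumerate_nil]
  | succ n ih =>
    intro ys h i
    match ys with
    | [] => simp [chunk, groupsBy, PySem.List.enumerate_nil]
    | x :: rest =>
      rw [PySem.List.enumerate_cons, chunk]
      simp only [groupsBy]
      rw [takeGroup_enum rest x i]
      have hlen : (takeRun x rest).2.length ≤ n := by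
        have := takeRun_len x rest
        simp at h
        omega
      rw [ih _ hlen]

-- A side: the fold with state R ++ [c] (c nonempty, last p) produces R ++ (extend c) :: chunk of the rest
theorem pyAppendLast_concat (R : List (List Int)) (c : List Int) (x : Int) :
    pyAppendLast (R ++ [c]) x = R ++ [c ++ [x]] := by
  induction R with
  | nil => simp [pyAppendLast]
  | cons r rs ih =>
    cases rs with
    | nil => simp [pyAppendLast]
    | cons a b => simp [pyAppendLast] at ih ⊢; exact ih

theorem foldl_runs (ys : List Int) : ∀ (R : List (List Int)) (c : List Int) (p : Int),
    c.getLast? = some p →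
    ys.foldl (fun runs y =>
      if (runs.getLastD []).getLast? = some (y - 1) then pyAppendLast runs y
      else runs ++ [[y]]) (R ++ [c]) =
    R ++ ((c ++ (takeRun p ys).1) :: chunk (takeRun p ys).2) := by
  induction ys with
  | nil => intro R c p _; simp [takeRun, chunk]
  | cons y ys ih =>
    intro R c p hlast
    have hGLD : (R ++ [c]).getLastD [] = c := by
      simp [List.getLastD_eq_getLast?, List.getLast?_append]
    by_cases hy : y = p + 1
    · have hcond : ((R ++ [c]).getLastD []).getLast? = some (y - 1) := by
        rw [hGLD, hlast]; congr 1; omega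
      rw [List.foldl_cons, if_pos hcond, pyAppendLast_concat]
      have hlast' : (c ++ [y]).getLast? = some y := by simp
      rw [ih R (c ++ [y]) y hlast']
      simp only [takeRun, if_pos hy]
      simp
    · have hcond : ¬ (((R ++ [c]).getLastD []).getLast? = some (y - 1)) := by
        rw [hGLD, hlast]
        intro h
        have := Option.some.inj h
        omega
      rw [List.foldl_cons, if_neg hcond]
      rw [ih (R ++ [c]) [y] y (by simp)]
      simp only [takeRun, if_neg hy, chunk]
      simp

theorem both_eq_chunk (xs : List Int) : group_into_runs xs = chunk xs := by
  match xs with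
  | [] => simp [group_into_runs, chunk]
  | x :: rest =>
    have := foldl_runs rest [] [x] x (by simp)
    simpa [group_into_runs, chunk] using this

-- ===== VERDICT (by name: the statement is the Claim_ definition above) =====
theorem group_into_runs_spec : Claim_equal_group_into_runs := by
  intro xs _
  show group_into_runs xs = group_into_runs_alt xs
  rw [both_eq_chunk, group_into_runs_alt, groupsBy_enum xs.length xs le_rfl 0]
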